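-- pv_equiv track=rewrite | github.com/FranGozze/bingo | src/bingo.py | numeros_no_repetidos
-- ===== SOURCE A (Python) =====
-- def numeros_no_repetidos(mi_carton):
--     aux= []
--     for fila in mi_carton:
--         for celda in fila:
--             if celda != 0:
--                 aux.append(celda)
--     if len(aux) !=  len(set(aux)):
--         return False
--
--     return True
-- ===== SOURCE B (Python) =====
-- def numeros_no_repetidos(mi_carton):
--     seen = set()
--     for fila in mi_carton:
--         for celda in fila:
--             if celda != 0:
--                 if celda in seen:
--                     return False
--                 seen.add(celda)
--     return True
-- ===== Notes on version B (the rewrite author's own statement) =====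
-- stated objective: simpler
-- what changed: B replaces A's two-phase approach (collect every non-zero cell into a list, then compare the list's length with its set's length) by a single incremental pass that maintains a seen-set and returns False at the first repeated non-zero cell.
import Mathlib
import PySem

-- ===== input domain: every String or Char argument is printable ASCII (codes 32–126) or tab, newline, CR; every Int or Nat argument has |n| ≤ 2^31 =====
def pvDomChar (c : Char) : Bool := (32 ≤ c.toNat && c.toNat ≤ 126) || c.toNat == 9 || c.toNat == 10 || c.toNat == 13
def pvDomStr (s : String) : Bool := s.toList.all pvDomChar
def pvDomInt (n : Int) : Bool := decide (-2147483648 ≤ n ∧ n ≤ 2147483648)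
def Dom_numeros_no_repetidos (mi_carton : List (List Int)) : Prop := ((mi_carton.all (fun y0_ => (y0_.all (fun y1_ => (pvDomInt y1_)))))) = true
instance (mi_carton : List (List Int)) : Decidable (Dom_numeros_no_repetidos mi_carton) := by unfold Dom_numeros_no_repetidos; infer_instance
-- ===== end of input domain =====

-- B is a single short-circuiting pass with an incrementally maintained seen-set,
-- instead of A's collect-everything-then-compare-lengths; objective: simpler.

-- ===== PORT A =====
def numeros_no_repetidos (mi_carton : List (List Int)) : Bool :=
  let aux : List Int :=
    mi_carton.foldl (fun aux fila =>
      fila.foldl (fun aux celda => if celda ≠ 0 then aux ++ [celda] else aux) aux) []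
  if aux.length ≠ (PySem.Set.ofList aux).length then false else true

-- ===== PORT B =====
-- inner loop of B: scan one row, early-exit (none) on a repeated non-zero cell
def nnrRow (seen : PySem.Set Int) (fila : List Int) : Option (PySem.Set Int) :=
  match fila with
  | [] => some seen
  | celda :: rest =>
    if celda ≠ 0 then
      if PySem.Set.contains seen celda then none
      else nnrRow (PySem.Set.add seen celda) rest
    else nnrRow seen rest

-- outer loop of B over the rows
def nnrRows (seen : PySem.Set Int) (rows : List (List Int)) : Bool :=
  match rows with
  | [] => true
  | fila :: rest =>
    match nnrRow seen fila with
    | none => false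
    | some seen' => nnrRows seen' rest

def numeros_no_repetidos_alt (mi_carton : List (List Int)) : Bool :=
  nnrRows PySem.Set.empty mi_carton

-- ===== PRECONDITION & SPEC =====
def Spec_numeros_no_repetidos (mi_carton : List (List Int)) (out : Bool) : Prop := out = numeros_no_repetidos_alt mi_carton
instance (mi_carton : List (List Int)) (out : Bool) : Decidable (Spec_numeros_no_repetidos mi_carton out) := by unfold Spec_numeros_no_repetidos; infer_instance

-- ===== CLAIM (what is proved, stated in full; the proofs are below) =====
def Claim_equal_numeros_no_repetidos : Prop := ∀ (mi_carton : List (List Int)), Dom_numeros_no_repetidos mi_carton → Spec_numeros_no_repetidos mi_carton (numeros_no_repetidos mi_carton)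

-- ===== LEMMAS AND PROOFS =====

-- A's inner fold appends exactly the non-zero cells of the row
lemma innerFold_eq (fila : List Int) (acc : List Int) :
    fila.foldl (fun aux celda => if celda ≠ 0 then aux ++ [celda] else aux) acc
      = acc ++ fila.filter (fun c => !decide (c = 0)) := by
  induction fila generalizing acc with
  | nil => simp
  | cons c rest ih =>
    rw [List.foldl_cons, List.filter_cons]
    by_cases h : c = 0
    · rw [if_neg (by simp [h]), ih]
      simp [h]
    · rw [if_pos h, ih]
      simp [h]

-- A's outer fold collects all non-zero cells of the grid, in order
lemma outerFold_eq (rows : List (List Int)) (acc : List Int) :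
    rows.foldl (fun aux fila =>
      fila.foldl (fun aux celda => if celda ≠ 0 then aux ++ [celda] else aux) aux) acc
      = acc ++ rows.flatMap (fun f => f.filter (fun c => !decide (c = 0))) := by
  induction rows generalizing acc with
  | nil => simp
  | cons r rest ih =>
    rw [List.foldl_cons, innerFold_eq, ih]
    simp [List.flatMap_cons, List.append_assoc]

-- length(set(xs)) = length(xs) iff xs has no duplicates
lemma length_ofList_eq_iff (xs : List Int) :
    (PySem.Set.ofList xs).length = xs.length ↔ xs.Nodup := by
  constructor
  · intro h
    have hsub : PySem.Set.ofList xs ⊆ xs := fun a ha => (PySem.Set.mem_ofList xs a).1 ha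
    have hsp : List.Subperm (PySem.Set.ofList xs) xs := (PySem.Set.nodup_ofList xs).subperm hsub
    have hperm : List.Perm (PySem.Set.ofList xs) xs := hsp.perm_of_length_le (le_of_eq h.symm)
    exact hperm.nodup_iff.mp (PySem.Set.nodup_ofList xs)
  · intro h
    rw [PySem.Set.ofList_eq_self_of_nodup xs h]

-- so A decides Nodup of the collected non-zero cells
lemma portA_eq_decide (mi_carton : List (List Int)) :
    numeros_no_repetidos mi_carton
      = decide ((mi_carton.flatMap (fun f => f.filter (fun c => !decide (c = 0)))).Nodup) := by
  unfold numeros_no_repetidos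
  rw [outerFold_eq, List.nil_append]
  set L := mi_carton.flatMap (fun f => f.filter (fun c => !decide (c = 0))) with hL
  by_cases h : L.Nodup
  · rw [if_neg (by rw [(length_ofList_eq_iff L).2 h]; simp), decide_eq_true h]
  · rw [if_pos (fun he => h ((length_ofList_eq_iff L).1 he.symm)), decide_eq_false h]

-- B's inner loop characterised: succeeds iff seen ++ (non-zero cells of the row) has no duplicates
lemma nnrRow_eq (fila : List Int) (seen : PySem.Set Int) (hs : seen.Nodup) :
    nnrRow seen fila
      = if (seen ++ fila.filter (fun c => !decide (c = 0))).Nodup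
        then some (seen ++ fila.filter (fun c => !decide (c = 0))) else none := by
  induction fila generalizing seen with
  | nil => simp [nnrRow, hs]
  | cons c rest ih =>
    by_cases hc : c = 0
    · simp only [nnrRow]
      rw [if_neg (by simp [hc]), ih seen hs, List.filter_cons]
      simp [hc]
    · by_cases hmem : c ∈ seen
      · have hcont : PySem.Set.contains seen c = true := by
          simp [PySem.Set.contains, hmem]
        have hdup : ¬ (seen ++ List.filter (fun c => !decide (c = 0)) (c :: rest)).Nodup := by
          intro hnd
          exact (List.disjoint_of_nodup_append hnd) hmem (by simp [List.mem_filter, hc])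
        simp only [nnrRow]
        rw [if_pos hc, hcont, if_pos rfl, if_neg hdup]
      · have hcontf : PySem.Set.contains seen c = false := by
          simpa [PySem.Set.contains] using hmem
        have hadd : PySem.Set.add seen c = seen ++ [c] := by
          simp [PySem.Set.add, PySem.Set.contains, hmem]
        have hdisj : List.Disjoint seen [c] := by
          intro a ha hb
          rw [List.mem_singleton] at hb
          exact hmem (hb ▸ ha)
        have hnd : (seen ++ [c]).Nodup := hs.append (List.nodup_singleton c) hdisj
        simp only [nnrRow]
        rw [if_pos hc, hcontf]
        simp only [Bool.false_eq_true, if_false]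
        rw [hadd, ih _ hnd, List.filter_cons]
        simp [hc, List.append_assoc]

-- B's outer loop decides Nodup of seen ++ all non-zero cells of the grid
lemma nnrRows_eq (rows : List (List Int)) (seen : PySem.Set Int) (hs : seen.Nodup) :
    nnrRows seen rows
      = decide ((seen ++ rows.flatMap (fun f => f.filter (fun c => !decide (c = 0)))).Nodup) := by
  induction rows generalizing seen with
  | nil => simp [nnrRows, hs]
  | cons r rest ih =>
    by_cases h : (seen ++ r.filter (fun c => !decide (c = 0))).Nodup
    · have hR : nnrRow seen r = some (seen ++ r.filter (fun c => !decide (c = 0))) := by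
        rw [nnrRow_eq r seen hs, if_pos h]
      simp only [nnrRows, hR]
      rw [ih _ h]
      simp [List.flatMap_cons, List.append_assoc]
    · have hR : nnrRow seen r = none := by
        rw [nnrRow_eq r seen hs, if_neg h]
      have hbig : ¬ (seen ++ (r :: rest).flatMap (fun f => f.filter (fun c => !decide (c = 0)))).Nodup := by
        intro hnd
        apply h
        have hsl : (seen ++ r.filter (fun c => !decide (c = 0))).Sublist
            (seen ++ (r :: rest).flatMap (fun f => f.filter (fun c => !decide (c = 0)))) := by
          rw [List.flatMap_cons, ← List.append_assoc]
          exact List.sublist_append_left _ _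
        exact hnd.sublist hsl
      simp only [nnrRows, hR]
      rw [decide_eq_false hbig]

-- ===== VERDICT (by name: the statement is the Claim_ definition above) =====
theorem numeros_no_repetidos_spec : Claim_equal_numeros_no_repetidos := by
  intro mi_carton _
  unfold Spec_numeros_no_repetidos numeros_no_repetidos_alt
  rw [portA_eq_decide, nnrRows_eq _ _ (by simp [PySem.Set.empty])]
  simp [PySem.Set.empty]
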